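-- pv_equiv track=rewrite | github.com/materi-ai/atlas | scripts/check_ownership.py | check_ownership_coverage
-- ===== SOURCE A (Python) =====
-- def page_matches_pattern(page: str, pattern: str) -> bool:
--     """Check if a page matches an ownership pattern."""
--     # Normalize escaped asterisks (from markdown formatting)
--     pattern = pattern.replace("\\*", "*")
--
--     if pattern.endswith("/*"):
--         prefix = pattern[:-1]  # Remove the *
--         return page.startswith(prefix)
--     else:
--         return page == pattern
--
-- def check_ownership_coverage(
--     pages: set[str], patterns: list[str]
-- ) -> tuple[set[str], set[str]]:
--     """
--     Check which pages are covered by ownership patterns.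
--
--     Returns (covered, uncovered) sets.
--     """
--     covered: set[str] = set()
--     uncovered: set[str] = set()
--
--     for page in pages:
--         is_covered = False
--         for pattern in patterns:
--             if page_matches_pattern(page, pattern):
--                 is_covered = True
--                 break
--         if is_covered:
--             covered.add(page)
--         else:
--             uncovered.add(page)
--
--     return covered, uncovered
-- ===== SOURCE B (Python) =====
-- def check_ownership_coverage(pages, patterns):
--     """Pattern-major strategy: each pattern collects, in one pass over the
--     page set, the set of pages it matches; 'matched' is the union of these
--     per-pattern match sets, and the answer is (pages & matched, pages - matched)."""
--     matched = set()
--     for pattern in patterns: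
--         p = pattern.replace("\\*", "*")
--         if p.endswith("/*"):
--             prefix = p[:-1]
--             matched.update(page for page in pages if page.startswith(prefix))
--         elif p in pages:
--             matched.add(p)
--     return pages & matched, pages - matched
-- ===== Notes on version B (the rewrite author's own statement) =====
-- stated objective: alternative
-- what changed: B inverts the loop nesting: instead of testing every pattern against each page with an early break, it iterates patterns outermost, letting each pattern collect the set of pages it matches (normalizing each pattern once and resolving exact patterns by a single set-membership test), and the result is obtained by the set operations pages & matched and pages - matched instead of a per-page partition loop.
import Mathlib
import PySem

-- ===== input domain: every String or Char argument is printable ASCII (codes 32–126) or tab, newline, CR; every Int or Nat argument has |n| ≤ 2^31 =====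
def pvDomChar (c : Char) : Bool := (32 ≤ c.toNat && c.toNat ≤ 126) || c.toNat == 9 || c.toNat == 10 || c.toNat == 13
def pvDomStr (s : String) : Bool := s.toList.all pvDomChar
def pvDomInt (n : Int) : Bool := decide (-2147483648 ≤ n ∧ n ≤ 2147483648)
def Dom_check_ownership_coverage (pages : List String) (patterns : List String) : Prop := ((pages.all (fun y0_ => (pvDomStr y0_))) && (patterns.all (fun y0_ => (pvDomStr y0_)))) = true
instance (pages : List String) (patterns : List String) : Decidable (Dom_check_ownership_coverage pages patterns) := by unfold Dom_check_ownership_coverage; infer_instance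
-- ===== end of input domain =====

-- B inverts the loop nesting: patterns are iterated outermost, each collecting the pages it
-- matches into one 'matched' set; the answer is then (pages & matched, pages - matched).

-- ===== PORT A =====
def page_matches_pattern (page : String) (pattern : String) : Bool :=
  let pattern := PySem.Str.replace pattern "\\*" "*"
  if PySem.Str.endswith pattern "/*" then
    PySem.Str.startswith page (PySem.Str.slice pattern none (some (-1)))
  else
    page == pattern

def check_ownership_coverage (pages : List String) (patterns : List String) : List String × List String :=
  pages.foldl
    (fun st page =>
      -- inner 'for pattern in patterns: … break' sets is_covered iff some pattern matches
      let is_covered := patterns.any (fun pattern => page_matches_pattern page pattern)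
      if is_covered then (PySem.Set.add st.1 page, st.2) else (st.1, PySem.Set.add st.2 page))
    ((PySem.Set.empty : PySem.Set String), (PySem.Set.empty : PySem.Set String))

-- ===== PORT B =====
def check_ownership_coverage_alt (pages : List String) (patterns : List String) : List String × List String :=
  let matched := patterns.foldl
    (fun m pattern =>
      let p := PySem.Str.replace pattern "\\*" "*"
      if PySem.Str.endswith p "/*" then
        -- matched.update(page for page in pages if page.startswith(prefix))
        PySem.Set.update m (pages.filter (fun page =>
          PySem.Str.startswith page (PySem.Str.slice p none (some (-1)))))
      else if pages.contains p then PySem.Set.add m p else m)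
    (PySem.Set.empty : PySem.Set String)
  (PySem.Set.inter (PySem.Set.ofList pages) matched,
   PySem.Set.diff (PySem.Set.ofList pages) matched)

-- ===== PRECONDITION & SPEC =====
def Spec_check_ownership_coverage (pages : List String) (patterns : List String) (out : List String × List String) : Prop := out = check_ownership_coverage_alt pages patterns
instance (pages : List String) (patterns : List String) (out : List String × List String) : Decidable (Spec_check_ownership_coverage pages patterns out) := by unfold Spec_check_ownership_coverage; infer_instance

-- ===== CLAIM =====
def Claim_equal_check_ownership_coverage : Prop := ∀ (pages : List String) (patterns : List String), Dom_check_ownership_coverage pages patterns → Spec_check_ownership_coverage pages patterns (check_ownership_coverage pages patterns)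

-- ===== LEMMAS AND PROOFS =====

lemma pv_contains_add (s : PySem.Set String) (x y : String) :
    PySem.Set.contains (PySem.Set.add s x) y = (PySem.Set.contains s y || y == x) := by
  rw [PySem.Set.add_eq_ite]
  split_ifs with hm
  · by_cases hyx : y = x
    · subst hyx; simp [hm]
    · simp [hyx]
  · simp [PySem.Set.contains_eq_listContains, Bool.beq_eq_decide_eq]

lemma pv_contains_update (l : List String) (m : PySem.Set String) (x : String) :
    PySem.Set.contains (PySem.Set.update m l) x = (PySem.Set.contains m x || l.contains x) := by
  induction l generalizing m with
  | nil => simp [PySem.Set.update]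
  | cons a t ih =>
    simp only [PySem.Set.update, List.foldl_cons] at *
    rw [ih, pv_contains_add]
    by_cases h1 : x = a <;> by_cases h2 : x ∈ t <;> by_cases h3 : x ∈ m <;> simp [h1, h2, h3]

lemma pv_contains_filter (l : List String) (p : String → Bool) (x : String) (hx : x ∈ l) :
    (l.filter p).contains x = p x := by
  by_cases hp : p x = true
  · have hm : x ∈ l.filter p := List.mem_filter.mpr ⟨hx, hp⟩
    simp [hm, hp]
  · have hm : x ∉ l.filter p := fun hmem => hp (List.mem_filter.mp hmem).2
    simp only [Bool.not_eq_true] at hp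
    simp [hm, hp]

/-- Membership in B's 'matched' set equals A's "some pattern matches", for every page of the set. -/
lemma pv_matched_contains (pages patterns : List String) (m : PySem.Set String) (x : String)
    (hx : x ∈ pages) :
    PySem.Set.contains (patterns.foldl
        (fun m pattern =>
          let p := PySem.Str.replace pattern "\\*" "*"
          if PySem.Str.endswith p "/*" then
            PySem.Set.update m (pages.filter (fun page =>
              PySem.Str.startswith page (PySem.Str.slice p none (some (-1)))))
          else if pages.contains p then PySem.Set.add m p else m) m) x
      = (PySem.Set.contains m x || patterns.any (fun pattern => page_matches_pattern x pattern)) := by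
  induction patterns generalizing m with
  | nil => simp
  | cons pat rest ih =>
    simp only [List.foldl_cons, List.any_cons]
    by_cases h : PySem.Str.endswith (PySem.Str.replace pat "\\*" "*") "/*" = true
    · rw [if_pos h, ih, pv_contains_update,
        pv_contains_filter pages _ x hx]
      simp only [page_matches_pattern, h, if_true]
      cases PySem.Set.contains m x <;>
        cases PySem.Str.startswith x (PySem.Str.slice (PySem.Str.replace pat "\\*" "*") none (some (-1))) <;>
        cases rest.any (fun p => page_matches_pattern x p) <;> rfl
    · rw [if_neg h]
      by_cases hp : pages.contains (PySem.Str.replace pat "\\*" "*") = true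
      · rw [if_pos hp, ih, pv_contains_add]
        simp only [page_matches_pattern, if_neg h]
        cases PySem.Set.contains m x <;>
          cases (x == PySem.Str.replace pat "\\*" "*") <;>
          cases rest.any (fun p => page_matches_pattern x p) <;> rfl
      · rw [if_neg hp, ih]
        have hxp : (x == PySem.Str.replace pat "\\*" "*") = false := by
          by_cases hxe : x = PySem.Str.replace pat "\\*" "*"
          · exact absurd (List.contains_iff_mem.mpr (hxe ▸ hx)) (by simpa using hp)
          · simp [hxe]
        simp only [page_matches_pattern, if_neg h, hxp]
        cases PySem.Set.contains m x <;> cases rest.any (fun p => page_matches_pattern x p) <;> rfl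

/-- A's "add the matching pages" loop computes the intersection with the already-built set. -/
lemma pv_foldl_inter (pages : List String) (t s : PySem.Set String) :
    pages.foldl (fun acc x => if PySem.Set.contains t x then PySem.Set.add acc x else acc)
        (PySem.Set.inter s t)
      = PySem.Set.inter (pages.foldl PySem.Set.add s) t := by
  induction pages generalizing s with
  | nil => rfl
  | cons a l ih =>
    simp only [List.foldl_cons]
    have step : (if PySem.Set.contains t a then PySem.Set.add (PySem.Set.inter s t) a
          else PySem.Set.inter s t) = PySem.Set.inter (PySem.Set.add s a) t := by
      simp only [PySem.Set.add, PySem.Set.inter, PySem.Set.contains]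
      by_cases hs : a ∈ s <;> by_cases ht : a ∈ t <;>
        simp [hs, ht, List.filter_append, List.mem_filter]
    rw [step, ih]

/-- A's "add the non-matching pages" loop computes the difference from the already-built set. -/
lemma pv_foldl_diff (pages : List String) (t s : PySem.Set String) :
    pages.foldl (fun acc x => if PySem.Set.contains t x then acc else PySem.Set.add acc x)
        (PySem.Set.diff s t)
      = PySem.Set.diff (pages.foldl PySem.Set.add s) t := by
  induction pages generalizing s with
  | nil => rfl
  | cons a l ih =>
    simp only [List.foldl_cons]
    have step : (if PySem.Set.contains t a then PySem.Set.diff s t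
          else PySem.Set.add (PySem.Set.diff s t) a) = PySem.Set.diff (PySem.Set.add s a) t := by
      simp only [PySem.Set.add, PySem.Set.diff, PySem.Set.contains]
      by_cases hs : a ∈ s <;> by_cases ht : a ∈ t <;>
        simp [hs, ht, List.filter_append, List.mem_filter]
    rw [step, ih]

-- ===== VERDICT =====
theorem check_ownership_coverage_spec : Claim_equal_check_ownership_coverage := by
  intro pages patterns _
  unfold Spec_check_ownership_coverage
  simp only [check_ownership_coverage, check_ownership_coverage_alt]
  set matched := patterns.foldl
      (fun m pattern =>
        let p := PySem.Str.replace pattern "\\*" "*"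
        if PySem.Str.endswith p "/*" then
          PySem.Set.update m (pages.filter (fun page =>
            PySem.Str.startswith page (PySem.Str.slice p none (some (-1)))))
        else if pages.contains p then PySem.Set.add m p else m)
      (PySem.Set.empty : PySem.Set String) with hmatched
  have hcond0 : ∀ x ∈ pages,
      (patterns.any (fun pattern => page_matches_pattern x pattern)) = PySem.Set.contains matched x := by
    intro x hx
    rw [hmatched, pv_matched_contains pages patterns PySem.Set.empty x hx]
    simp [PySem.Set.contains, PySem.Set.empty]
  rw [show (fun (st : PySem.Set String × PySem.Set String) (page : String) =>
        let is_covered := patterns.any (fun pattern => page_matches_pattern page pattern)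
        if is_covered then (PySem.Set.add st.1 page, st.2) else (st.1, PySem.Set.add st.2 page))
      = (fun (s : PySem.Set String × PySem.Set String) (e : String) =>
        ((fun acc x => if patterns.any (fun pattern => page_matches_pattern x pattern)
            then PySem.Set.add acc x else acc) s.1 e,
         (fun acc x => if patterns.any (fun pattern => page_matches_pattern x pattern)
            then acc else PySem.Set.add acc x) s.2 e)) from by
    funext st page; simp only []; split_ifs <;> rfl]
  rw [PySem.List.foldl_prod_mk
    (f := fun acc x => if patterns.any (fun pattern => page_matches_pattern x pattern)
        then PySem.Set.add acc x else acc)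
    (g := fun acc x => if patterns.any (fun pattern => page_matches_pattern x pattern)
        then acc else PySem.Set.add acc x)]
  refine Prod.ext ?_ ?_ <;> dsimp only
  · have hrw := PySem.List.foldl_congr_mem pages
      (fun acc x => if patterns.any (fun pattern => page_matches_pattern x pattern)
          then PySem.Set.add acc x else acc)
      (fun acc x => if PySem.Set.contains matched x then PySem.Set.add acc x else acc)
      PySem.Set.empty
      (fun acc x hx => by simp only [hcond0 x hx])
    rw [hrw]
    exact pv_foldl_inter pages matched PySem.Set.empty
  · have hrw := PySem.List.foldl_congr_mem pages
      (fun acc x => if patterns.any (fun pattern => page_matches_pattern x pattern)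
          then acc else PySem.Set.add acc x)
      (fun acc x => if PySem.Set.contains matched x then acc else PySem.Set.add acc x)
      PySem.Set.empty
      (fun acc x hx => by simp only [hcond0 x hx])
    rw [hrw]
    exact pv_foldl_diff pages matched PySem.Set.empty
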